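-- pv_equiv track=rewrite | github.com/wanglongjiang/leetcode | easy/1385-find-the-distance-value-between-two-arrays.py | findTheDistanceValue
-- ===== SOURCE A (Python) =====
-- from typing import List
-- import bisect
--
-- def findTheDistanceValue(arr1: List[int], arr2: List[int], d: int) -> int:
--     arr2.sort()
--     ans = 0
--     for val in arr1:
--         index = bisect.bisect_left(arr2, val)
--         if index == len(arr2) or abs(val - arr2[index]) > d:
--             if index == 0 or abs(val - arr2[index - 1]) > d:
--                 ans += 1
--     return ans
-- ===== SOURCE B (Python) =====
-- def findTheDistanceValue(arr1, arr2, d):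
--     # arr2.sort() kept: A mutates arr2 in place; return value does not depend on the order.
--     arr2.sort()
--     return sum(1 for val in arr1 if all(abs(val - y) > d for y in arr2))
-- ===== Notes on version B (the rewrite author's own statement) =====
-- stated objective: simpler
-- what changed: Replaces the bisect-based neighbour check (binary search plus two boundary/abs tests per element) with a direct brute-force count: an element of arr1 is counted iff every element of arr2 is farther than d.
import Mathlib
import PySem

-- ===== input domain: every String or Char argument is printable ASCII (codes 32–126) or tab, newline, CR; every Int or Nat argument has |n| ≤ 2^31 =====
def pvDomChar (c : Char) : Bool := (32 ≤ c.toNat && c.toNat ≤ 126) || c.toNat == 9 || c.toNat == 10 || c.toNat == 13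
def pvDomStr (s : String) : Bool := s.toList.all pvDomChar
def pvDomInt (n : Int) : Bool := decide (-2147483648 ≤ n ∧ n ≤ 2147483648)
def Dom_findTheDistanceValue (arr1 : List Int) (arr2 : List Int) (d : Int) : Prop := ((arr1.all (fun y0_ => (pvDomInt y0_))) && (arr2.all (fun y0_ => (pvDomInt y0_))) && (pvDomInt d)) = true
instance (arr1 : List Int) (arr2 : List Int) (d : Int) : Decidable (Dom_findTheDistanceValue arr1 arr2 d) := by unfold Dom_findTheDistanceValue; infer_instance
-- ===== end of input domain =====

-- B replaces A's bisect-based neighbour check by a direct brute-force count; the return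
-- value is proved equal.  Both Pythons sort arr2 in place (the only side effect, identical in A and B);
-- the theorems here are about the return value.

-- ===== PORT A =====
-- A: sort arr2, then for each val find the insertion point by binary search and test the
-- two neighbouring elements.  bisect.bisect_left is PySem.List.bisectLeft.
def findTheDistanceValue (arr1 : List Int) (arr2 : List Int) (d : Int) : Int :=
  let s := PySem.List.sorted arr2 (fun x => x)
  arr1.foldl (fun ans val =>
    let index := PySem.List.bisectLeft s val
    if index = s.length ∨ |val - PySem.List.pyGetD s (index : Int) 0| > d then
      if index = 0 ∨ |val - PySem.List.pyGetD s ((index : Int) - 1) 0| > d then ans + 1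
      else ans
    else ans) 0

-- ===== PORT B =====
-- B: sort (kept for the in-place mutation), then count the elements of arr1 that are
-- farther than d from every element of arr2.
def findTheDistanceValue_alt (arr1 : List Int) (arr2 : List Int) (d : Int) : Int :=
  let s := PySem.List.sorted arr2 (fun x => x)
  ((arr1.filter (fun val => s.all (fun y => decide (|val - y| > d)))).length : Int)

-- ===== PRECONDITION & SPEC =====
def Spec_findTheDistanceValue (arr1 : List Int) (arr2 : List Int) (d : Int) (out : Int) : Prop := out = findTheDistanceValue_alt arr1 arr2 d
instance (arr1 : List Int) (arr2 : List Int) (d : Int) (out : Int) : Decidable (Spec_findTheDistanceValue arr1 arr2 d out) := by unfold Spec_findTheDistanceValue; infer_instance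

-- ===== CLAIM (what is proved, stated in full; the proofs are below) =====
def Claim_equal_findTheDistanceValue : Prop := ∀ (arr1 : List Int) (arr2 : List Int) (d : Int), Dom_findTheDistanceValue arr1 arr2 d → Spec_findTheDistanceValue arr1 arr2 d (findTheDistanceValue arr1 arr2 d)

-- ===== LEMMAS AND PROOFS =====

-- On a sorted list, A's two neighbour tests around the insertion point hold exactly when
-- every element of the list is farther than d from val.
theorem bisect_cond_iff_all (s : List Int) (hs : s.Pairwise (· ≤ ·)) (val d : Int) :
    ((PySem.List.bisectLeft s val = s.length ∨
        |val - PySem.List.pyGetD s ((PySem.List.bisectLeft s val : Nat) : Int) 0| > d) ∧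
     (PySem.List.bisectLeft s val = 0 ∨
        |val - PySem.List.pyGetD s (((PySem.List.bisectLeft s val : Nat) : Int) - 1) 0| > d))
    ↔ (∀ y ∈ s, |val - y| > d) := by
  obtain ⟨hle, hlt, hge⟩ := PySem.List.bisectLeft_spec s val hs
  set i := PySem.List.bisectLeft s val with hi
  have hmono : ∀ (p q : Nat) (hp : p < s.length) (hq : q < s.length), p ≤ q → s[p] ≤ s[q] := by
    intro p q hp hq hpq
    rcases Nat.lt_or_ge p q with h | h
    · exact List.pairwise_iff_getElem.mp hs p q hp hq h
    · have : p = q := Nat.le_antisymm hpq h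
      subst this; exact le_refl _
  constructor
  · rintro ⟨h1, h2⟩ y hy
    obtain ⟨j, hj, rfl⟩ := List.mem_iff_getElem.mp hy
    rcases Nat.lt_or_ge j i with hji | hij
    · -- j < i : s[j] < val; compare with s[i-1]
      have hi0 : i ≠ 0 := by omega
      have him1 : i - 1 < s.length := by omega
      rcases h2 with h2 | h2
      · exact absurd h2 hi0
      · have hg : PySem.List.pyGetD s (((i : Nat) : Int) - 1) 0 = s[i - 1] := by
          have h0 : (0 : Int) ≤ ((i : Nat) : Int) - 1 := by omega
          have h1' : ((i : Nat) : Int) - 1 < (s.length : Int) := by omega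
          rw [PySem.List.pyGetD_eq_getElem s 0 h0 h1']
          congr 1; omega
        rw [hg] at h2
        have hjle : s[j] ≤ s[i - 1] := hmono j (i - 1) hj him1 (by omega)
        have hjlt : s[j] < val := hlt j hj hji
        have him1lt : s[i - 1] < val := hlt (i - 1) him1 (by omega)
        rw [abs_of_pos (by omega)] at h2 ⊢
        omega
    · -- i ≤ j : val ≤ s[j]; compare with s[i]
      have hiln : i ≠ s.length := by omega
      rcases h1 with h1 | h1
      · exact absurd h1 hiln
      · have hilen : i < s.length := by omega
        have hg : PySem.List.pyGetD s ((i : Nat) : Int) 0 = s[i] := by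
          rw [PySem.List.pyGetD_eq_getElem s 0 (by omega) (by exact_mod_cast hilen)]
          simp
        rw [hg] at h1
        have hile : s[i] ≤ s[j] := hmono i j hilen hj hij
        have hival : val ≤ s[i] := hge i hilen (le_refl _)
        have hjval : val ≤ s[j] := hge j hj hij
        rw [abs_of_nonpos (by omega)] at h1
        rw [abs_of_nonpos (by omega)]
        omega
  · intro hall
    constructor
    · rcases Nat.eq_or_lt_of_le hle with h | h
      · exact Or.inl h
      · refine Or.inr ?_
        have hg : PySem.List.pyGetD s ((i : Nat) : Int) 0 = s[i] := by
          rw [PySem.List.pyGetD_eq_getElem s 0 (by omega) (by exact_mod_cast h)]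
          simp
        rw [hg]; exact hall _ (s.getElem_mem h)
    · rcases Nat.eq_zero_or_pos i with h | h
      · exact Or.inl h
      · refine Or.inr ?_
        have him1 : i - 1 < s.length := by omega
        have hg : PySem.List.pyGetD s (((i : Nat) : Int) - 1) 0 = s[i - 1] := by
          have h0 : (0 : Int) ≤ ((i : Nat) : Int) - 1 := by omega
          have h1' : ((i : Nat) : Int) - 1 < (s.length : Int) := by omega
          rw [PySem.List.pyGetD_eq_getElem s 0 h0 h1']
          congr 1; omega
        rw [hg]; exact hall _ (s.getElem_mem him1)

-- A's accumulator loop counts exactly the elements B's filter keeps.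
theorem foldl_count (s : List Int) (hs : s.Pairwise (· ≤ ·)) (d : Int) :
    ∀ (arr1 : List Int) (c : Int),
      arr1.foldl (fun ans val =>
        let index := PySem.List.bisectLeft s val
        if index = s.length ∨ |val - PySem.List.pyGetD s (index : Int) 0| > d then
          if index = 0 ∨ |val - PySem.List.pyGetD s ((index : Int) - 1) 0| > d then ans + 1
          else ans
        else ans) c
      = c + ((arr1.filter (fun val => s.all (fun y => decide (|val - y| > d)))).length : Int) := by
  intro arr1
  induction arr1 with
  | nil => intro c; simp only [List.foldl_nil, List.filter_nil, List.length_nil, Int.natCast_zero, add_zero]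
  | cons x xs ih =>
    intro c
    have hiff := bisect_cond_iff_all s hs x d
    by_cases hx : ∀ y ∈ s, |x - y| > d
    · have h1 : PySem.List.bisectLeft s x = s.length ∨
          |x - PySem.List.pyGetD s ((PySem.List.bisectLeft s x : Nat) : Int) 0| > d :=
        (hiff.mpr hx).1
      have h2 : PySem.List.bisectLeft s x = 0 ∨
          |x - PySem.List.pyGetD s (((PySem.List.bisectLeft s x : Nat) : Int) - 1) 0| > d :=
        (hiff.mpr hx).2
      have hb : (s.all (fun y => decide (|x - y| > d))) = true := by
        simp only [List.all_eq_true, decide_eq_true_eq]; exact hx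
      simp only [List.foldl_cons, List.filter_cons, hb, if_pos h1, if_pos h2, ih]
      norm_num
      ring
    · have hb : (s.all (fun y => decide (|x - y| > d))) = false := by
        simp only [List.all_eq_false]
        push Not at hx
        obtain ⟨y, hy, hyd⟩ := hx
        exact ⟨y, hy, by simpa using hyd⟩
      have hnc : ¬ ((PySem.List.bisectLeft s x = s.length ∨
            |x - PySem.List.pyGetD s ((PySem.List.bisectLeft s x : Nat) : Int) 0| > d) ∧
          (PySem.List.bisectLeft s x = 0 ∨
            |x - PySem.List.pyGetD s (((PySem.List.bisectLeft s x : Nat) : Int) - 1) 0| > d)) := by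
        intro hc; exact hx (hiff.mp hc)
      simp only [List.foldl_cons, List.filter_cons, hb]
      by_cases h1 : PySem.List.bisectLeft s x = s.length ∨
          |x - PySem.List.pyGetD s ((PySem.List.bisectLeft s x : Nat) : Int) 0| > d
      · have h2 : ¬ (PySem.List.bisectLeft s x = 0 ∨
            |x - PySem.List.pyGetD s (((PySem.List.bisectLeft s x : Nat) : Int) - 1) 0| > d) :=
          fun h2 => hnc ⟨h1, h2⟩
        simp only [if_pos h1, if_neg h2, ih]
        simp
      · simp only [if_neg h1, ih]
        simp

-- ===== VERDICT (by name: the statement is the Claim_ definition above) =====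
theorem findTheDistanceValue_spec : Claim_equal_findTheDistanceValue := by
  intro arr1 arr2 d _
  unfold Spec_findTheDistanceValue findTheDistanceValue findTheDistanceValue_alt
  have hs := PySem.List.sorted_pairwise arr2 (fun x => x)
  simpa using foldl_count (PySem.List.sorted arr2 (fun x => x)) hs d arr1 0
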